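-- pv_equiv track=rewrite | github.com/mfsass/World-Bank-Analyst | pipeline/storage.py | _merge_source_date_ranges
-- ===== SOURCE A (Python) =====
-- def _merge_source_date_ranges(source_date_ranges: set[str]) -> str | None:
--     """Merge one or more YYYY:YYYY source windows into one panel-wide range."""
--
--     if not source_date_ranges:
--         return None
--
--     parsed_ranges: list[tuple[int, int]] = []
--     for value in source_date_ranges:
--         try:
--             start_text, end_text = str(value).split(":", maxsplit=1)
--             parsed_ranges.append((int(start_text), int(end_text)))
--         except (TypeError, ValueError):
--             continue
--
--     if not parsed_ranges:
--         return sorted(source_date_ranges)[0]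
--
--     start_year = min(start_year for start_year, _ in parsed_ranges)
--     end_year = max(end_year for _, end_year in parsed_ranges)
--     return f"{start_year}:{end_year}"
-- ===== SOURCE B (Python) =====
-- def _merge_source_date_ranges(source_date_ranges):
--     """Merge one or more YYYY:YYYY source windows into one panel-wide range."""
--
--     if not source_date_ranges:
--         return None
--
--     best = None  # running (min_start, max_end) over the parseable entries
--     for value in source_date_ranges:
--         try:
--             start_text, end_text = str(value).split(":", maxsplit=1)
--             start_year, end_year = int(start_text), int(end_text)
--         except (TypeError, ValueError):
--             continue
--         if best is None:
--             best = (start_year, end_year)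
--         else:
--             best = (min(best[0], start_year), max(best[1], end_year))
--
--     if best is None:
--         return sorted(source_date_ranges)[0]
--     return f"{best[0]}:{best[1]}"
-- ===== Notes on version B (the rewrite author's own statement) =====
-- stated objective: simpler
-- what changed: Replaces build-a-parsed-list-then-two-reduction-passes (min over starts, max over ends) with a single fold that keeps one running (min_start, max_end) accumulator, so no intermediate list is built.
import Mathlib
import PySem

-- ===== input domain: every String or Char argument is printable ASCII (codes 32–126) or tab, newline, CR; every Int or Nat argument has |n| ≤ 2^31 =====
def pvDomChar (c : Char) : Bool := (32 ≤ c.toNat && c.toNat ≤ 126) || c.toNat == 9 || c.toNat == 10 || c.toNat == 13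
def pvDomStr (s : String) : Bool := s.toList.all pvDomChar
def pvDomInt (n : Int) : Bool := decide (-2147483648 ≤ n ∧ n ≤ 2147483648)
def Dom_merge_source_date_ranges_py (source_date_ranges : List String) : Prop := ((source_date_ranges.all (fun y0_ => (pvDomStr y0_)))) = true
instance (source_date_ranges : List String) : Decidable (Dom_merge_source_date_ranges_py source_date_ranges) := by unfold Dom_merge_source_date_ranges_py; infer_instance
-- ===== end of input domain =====

-- B replaces A's build-a-parsed-list-then-two-reduction-passes with a single fold
-- keeping one running (min_start, max_end) accumulator (objective: simpler).

-- ===== PORT A =====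
def merge_source_date_ranges_py (source_date_ranges : List String) : Option String :=
  if source_date_ranges = [] then none
  else
    let parsed_ranges : List (Int × Int) :=
      source_date_ranges.foldl (fun acc value =>
        match PySem.Str.splitMax? value ":" 1 with
        | some [start_text, end_text] =>
          match PySem.Int.ofStr? start_text, PySem.Int.ofStr? end_text with
          | some s, some e => acc ++ [(s, e)]
          | _, _ => acc
        | _ => acc) []
    if parsed_ranges = [] then
      -- sorted(source_date_ranges)[0]; the list is nonempty here, so [0] never raises
      (PySem.List.sorted source_date_ranges (fun x => x) false).head?
    else
      match PySem.List.min? (parsed_ranges.map (fun p => p.1)) (fun x => x),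
            PySem.List.max? (parsed_ranges.map (fun p => p.2)) (fun x => x) with
      | some start_year, some end_year =>
          some (PySem.Int.toStr start_year ++ ":" ++ PySem.Int.toStr end_year)
      | _, _ => none  -- unreachable: parsed_ranges ≠ []

-- ===== PORT B =====
def merge_source_date_ranges_py_alt (source_date_ranges : List String) : Option String :=
  if source_date_ranges = [] then none
  else
    let best : Option (Int × Int) :=
      source_date_ranges.foldl (fun best value =>
        match PySem.Str.splitMax? value ":" 1 with
        | none => best
        | some pieces =>
          match pieces with
          | [] => best
          -- rest is always [] (maxsplit=1); a nonempty rest would be Python's unpack ValueError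
          | start_text :: tail =>
            match tail with
            | [] => best
            | end_text :: rest =>
              if rest.isEmpty then
                match PySem.Int.ofStr? start_text with
                | none => best
                | some s =>
                  match PySem.Int.ofStr? end_text with
                  | none => best
                  | some e =>
                    match best with
                    | none => some (s, e)
                    | some (ms, me) => some (min ms s, max me e)
              else best) none
    match best with
    | none => (PySem.List.sorted source_date_ranges (fun x => x) false).head?
    | some (s, e) => some (PySem.Int.toStr s ++ ":" ++ PySem.Int.toStr e)

-- ===== PRECONDITION & SPEC =====
def Spec_merge_source_date_ranges_py (source_date_ranges : List String) (out : Option String) : Prop := out = merge_source_date_ranges_py_alt source_date_ranges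
instance (source_date_ranges : List String) (out : Option String) : Decidable (Spec_merge_source_date_ranges_py source_date_ranges out) := by unfold Spec_merge_source_date_ranges_py; infer_instance

-- ===== CLAIM (what is proved, stated in full; the proofs are below) =====
def Claim_equal_merge_source_date_ranges_py : Prop := ∀ (source_date_ranges : List String), Dom_merge_source_date_ranges_py source_date_ranges → Spec_merge_source_date_ranges_py source_date_ranges (merge_source_date_ranges_py source_date_ranges)

-- ===== LEMMAS AND PROOFS =====

/-- The parse step both ports share: `value.split(":",1)` into exactly two int-parsable pieces. -/
def pvParse? (value : String) : Option (Int × Int) :=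
  match PySem.Str.splitMax? value ":" 1 with
  | some [start_text, end_text] =>
    match PySem.Int.ofStr? start_text, PySem.Int.ofStr? end_text with
    | some s, some e => some (s, e)
    | _, _ => none
  | _ => none

/-- A's list-building fold is `filterMap pvParse?`. -/
theorem foldA_eq (xs : List String) (acc : List (Int × Int)) :
    xs.foldl (fun acc value =>
        match PySem.Str.splitMax? value ":" 1 with
        | some [start_text, end_text] =>
          match PySem.Int.ofStr? start_text, PySem.Int.ofStr? end_text with
          | some s, some e => acc ++ [(s, e)]
          | _, _ => acc
        | _ => acc) acc = acc ++ xs.filterMap pvParse? := by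
  induction xs generalizing acc with
  | nil => simp
  | cons v t ih =>
    simp only [List.foldl_cons, List.filterMap_cons, ih, pvParse?]
    cases h : PySem.Str.splitMax? v ":" 1 with
    | none => simp
    | some l =>
      match l with
      | [] => simp
      | [a] => simp
      | a :: b :: c :: r => simp
      | [a, b] =>
        cases h1 : PySem.Int.ofStr? a <;> cases h2 : PySem.Int.ofStr? b <;>
          simp [h1, h2]

def pvStep (best : Option (Int × Int)) (q : Int × Int) : Option (Int × Int) :=
  match best with
  | none => some q
  | some (ms, me) => some (min ms q.1, max me q.2)

/-- B's fold is the `pvStep` fold over `filterMap pvParse?`. -/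
theorem foldB_eq (xs : List String) (best : Option (Int × Int)) :
    xs.foldl (fun best value =>
        match PySem.Str.splitMax? value ":" 1 with
        | none => best
        | some pieces =>
          match pieces with
          | [] => best
          | start_text :: tail =>
            match tail with
            | [] => best
            | end_text :: rest =>
              if rest.isEmpty then
                match PySem.Int.ofStr? start_text with
                | none => best
                | some s =>
                  match PySem.Int.ofStr? end_text with
                  | none => best
                  | some e =>
                    match best with
                    | none => some (s, e)
                    | some (ms, me) => some (min ms s, max me e)
              else best) best = (xs.filterMap pvParse?).foldl pvStep best := by
  induction xs generalizing best with
  | nil => simp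
  | cons v t ih =>
    simp only [List.foldl_cons, List.filterMap_cons, ih, pvParse?]
    cases h : PySem.Str.splitMax? v ":" 1 with
    | none => simp
    | some l =>
      match l with
      | [] => simp
      | [a] => simp
      | a :: b :: c :: r => simp
      | [a, b] =>
        cases h1 : PySem.Int.ofStr? a <;> cases h2 : PySem.Int.ofStr? b <;>
          rcases best with _ | ⟨ms, me⟩ <;> simp [h1, h2, pvStep]

theorem stepfold_some (t : List (Int × Int)) (p : Int × Int) :
    t.foldl pvStep (some p) =
      some (t.foldl (fun m q => (min m.1 q.1, max m.2 q.2)) p) := by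
  induction t generalizing p with
  | nil => rfl
  | cons q r ih => simpa [pvStep] using ih _

theorem pairfold_fst (t : List (Int × Int)) (p : Int × Int) :
    (t.foldl (fun m q => (min m.1 q.1, max m.2 q.2)) p).1 =
      (t.map (fun q => q.1)).foldl min p.1 := by
  induction t generalizing p with
  | nil => rfl
  | cons q r ih => simpa using ih _

theorem pairfold_snd (t : List (Int × Int)) (p : Int × Int) :
    (t.foldl (fun m q => (min m.1 q.1, max m.2 q.2)) p).2 =
      (t.map (fun q => q.2)).foldl max p.2 := by
  induction t generalizing p with
  | nil => rfl
  | cons q r ih => simpa using ih _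

-- ===== VERDICT (by name: the statement is the Claim_ definition above) =====
theorem merge_source_date_ranges_py_spec : Claim_equal_merge_source_date_ranges_py := by
  intro xs _
  unfold Spec_merge_source_date_ranges_py merge_source_date_ranges_py merge_source_date_ranges_py_alt
  by_cases hxs : xs = []
  · simp [hxs]
  · simp only [if_neg hxs, foldA_eq, foldB_eq, List.nil_append]
    cases hps : xs.filterMap pvParse? with
    | nil => simp
    | cons p t =>
      simp only [List.foldl_cons, pvStep, stepfold_some,
        List.map_cons, PySem.List.min?_id_cons, PySem.List.max?_id_cons,
        if_neg (by simp : ¬ (p :: t = []))]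
      rw [← pairfold_fst, ← pairfold_snd]
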